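-- pv_equiv track=rewrite | github.com/makarenko1/Thesis | shapley_values.py | _remove_multiset
-- ===== SOURCE A (Python) =====
-- from collections import defaultdict, Counter
--
-- def _remove_multiset(base_list, to_remove):
--     """
--         Remove a multiset of tuples from a base list while preserving order.
--
--         Parameters
--         ----------
--         base_list : list[tuple]
--             Full dataset represented as a list of tuples (S, O, A).
--         to_remove : list[tuple]
--             Tuples to remove (with multiplicities).
--
--         Returns
--         -------
--         list[tuple]
--             base_list with one occurrence of each element in `to_remove` removed.
--         """
--     need = Counter(to_remove)
--     out = []
--     for x in base_list:
--         if need[x] > 0: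
--             need[x] -= 1
--         else:
--             out.append(x)
--     return out
-- ===== SOURCE B (Python) =====
-- def _remove_multiset(base_list, to_remove):
--     out = list(base_list)
--     for x in to_remove:
--         if x in out:
--             out.remove(x)
--     return out
-- ===== Notes on version B (the rewrite author's own statement) =====
-- stated objective: simpler
-- what changed: Instead of counting to_remove into a Counter and filtering base_list against the counts, B copies base_list and iterates over to_remove, deleting the first occurrence of each element from the mutable copy.
import Mathlib
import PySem

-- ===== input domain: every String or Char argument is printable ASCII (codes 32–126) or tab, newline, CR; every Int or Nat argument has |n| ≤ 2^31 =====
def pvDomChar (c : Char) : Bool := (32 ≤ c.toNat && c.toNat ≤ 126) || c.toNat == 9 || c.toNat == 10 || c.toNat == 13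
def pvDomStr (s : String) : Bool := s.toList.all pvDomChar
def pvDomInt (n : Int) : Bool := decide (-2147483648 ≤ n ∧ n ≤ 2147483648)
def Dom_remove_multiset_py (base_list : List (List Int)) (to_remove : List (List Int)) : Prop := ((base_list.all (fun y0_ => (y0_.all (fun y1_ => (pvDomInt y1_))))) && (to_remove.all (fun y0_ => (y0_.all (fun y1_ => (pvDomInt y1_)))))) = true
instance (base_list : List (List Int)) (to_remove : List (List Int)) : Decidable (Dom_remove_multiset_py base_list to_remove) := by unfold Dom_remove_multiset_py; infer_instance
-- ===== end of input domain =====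

-- B replaces A's counter-filter pass with a plainer search-and-delete loop over to_remove
-- against a mutable copy of base_list (objective: simpler; not faster).

-- ===== PORT A =====
-- need = Counter(to_remove); single pass over base_list skipping still-needed elements.
def remove_multiset_py (base_list : List (List Int)) (to_remove : List (List Int)) : List (List Int) :=
  let need := PySem.Dict.counter to_remove
  (base_list.foldl
    (fun (st : PySem.Dict (List Int) Int × List (List Int)) x =>
      if st.1.getD x 0 > 0 then (st.1.insert x (st.1.getD x 0 - 1), st.2)
      else (st.1, st.2 ++ [x]))
    (need, [])).2

-- ===== PORT B =====
-- out = list(base_list); for x in to_remove: if x in out: out.remove(x)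
def remove_multiset_py_alt (base_list : List (List Int)) (to_remove : List (List Int)) : List (List Int) :=
  to_remove.foldl
    (fun out x => if x ∈ out then (PySem.List.remove? out x).getD out else out)
    base_list

-- ===== PRECONDITION & SPEC =====
def Spec_remove_multiset_py (base_list : List (List Int)) (to_remove : List (List Int)) (out : List (List Int)) : Prop := out = remove_multiset_py_alt base_list to_remove
instance (base_list : List (List Int)) (to_remove : List (List Int)) (out : List (List Int)) : Decidable (Spec_remove_multiset_py base_list to_remove out) := by unfold Spec_remove_multiset_py; infer_instance

-- ===== CLAIM (what is proved, stated in full; the proofs are below) =====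
def Claim_equal_remove_multiset_py : Prop := ∀ (base_list : List (List Int)) (to_remove : List (List Int)), Dom_remove_multiset_py base_list to_remove → Spec_remove_multiset_py base_list to_remove (remove_multiset_py base_list to_remove)

-- ===== LEMMAS AND PROOFS =====

-- Abstract view of A's filtering loop: the counter dict as a count function.
def pvUpd (c : List Int → Int) (x : List Int) (v : Int) : List Int → Int :=
  fun w => if w = x then v else c w

def pvLoopF (c : List Int → Int) : List (List Int) → List (List Int)
  | [] => []
  | x :: xs =>
      if c x > 0 then pvLoopF (pvUpd c x (c x - 1)) xs
      else x :: pvLoopF c xs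

lemma pvUpd_self (c : List Int → Int) (x : List Int) (v : Int) : pvUpd c x v x = v := by
  simp [pvUpd]

lemma pvUpd_other (c : List Int → Int) (x w : List Int) (v : Int) (h : w ≠ x) :
    pvUpd c x v w = c w := by
  simp [pvUpd, h]

lemma pvA_loop (base : List (List Int)) (d : PySem.Dict (List Int) Int)
    (out : List (List Int)) :
    (base.foldl
      (fun (st : PySem.Dict (List Int) Int × List (List Int)) x =>
        if st.1.getD x 0 > 0 then (st.1.insert x (st.1.getD x 0 - 1), st.2)
        else (st.1, st.2 ++ [x]))
      (d, out)).2 = out ++ pvLoopF (fun v => d.getD v 0) base := by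
  induction base generalizing d out with
  | nil => simp [pvLoopF]
  | cons x xs ih =>
    simp only [List.foldl_cons, pvLoopF]
    by_cases h : d.getD x 0 > 0
    · simp only [h, if_pos]
      rw [ih]
      have hfun : (fun v => (d.insert x (d.getD x 0 - 1)).getD v 0)
          = pvUpd (fun v => d.getD v 0) x (d.getD x 0 - 1) := by
        funext w
        by_cases hw : w = x
        · subst hw; rw [PySem.Dict.getD_insert_self, pvUpd_self]
        · rw [pvUpd_other _ _ _ _ hw, PySem.Dict.getD_insert_of_ne]; exact hw
      rw [hfun]
    · simp only [h, if_neg, not_false_iff]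
      rw [ih]
      simp

-- Adding one needed copy of y is the same as first deleting the first y.
lemma pvLoopF_bump (base : List (List Int)) (c : List Int → Int) (y : List Int)
    (hy : 0 ≤ c y) :
    pvLoopF (pvUpd c y (c y + 1)) base = pvLoopF c (base.erase y) := by
  induction base generalizing c with
  | nil => simp [pvLoopF]
  | cons x xs ih =>
    by_cases hxy : x = y
    · subst hxy
      rw [List.erase_cons_head]
      simp only [pvLoopF, pvUpd_self]
      rw [if_pos (by omega)]
      have hfun : pvUpd (pvUpd c x (c x + 1)) x (c x + 1 - 1) = c := by
        funext w
        by_cases hw : w = x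
        · subst hw; rw [pvUpd_self]; omega
        · rw [pvUpd_other _ _ _ _ hw, pvUpd_other _ _ _ _ hw]
      rw [hfun]
    · rw [List.erase_cons_tail (by simpa using fun h => hxy (by simpa using h))]
      simp only [pvLoopF, pvUpd_other c y x _ hxy]
      by_cases hx : c x > 0
      · rw [if_pos hx, if_pos hx]
        have hfun : pvUpd (pvUpd c y (c y + 1)) x (c x - 1)
            = pvUpd (pvUpd c x (c x - 1)) y (pvUpd c x (c x - 1) y + 1) := by
          have hyx : y ≠ x := fun h => hxy h.symm
          funext w
          by_cases hwx : w = x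
          · subst hwx
            rw [pvUpd_self, pvUpd_other _ _ _ _ hxy, pvUpd_self]
          · rw [pvUpd_other _ _ _ _ hwx]
            by_cases hwy : w = y
            · subst hwy
              rw [pvUpd_self, pvUpd_self, pvUpd_other _ _ _ _ hyx]
            · rw [pvUpd_other _ _ _ _ hwy, pvUpd_other _ _ _ _ hwy,
                pvUpd_other _ _ _ _ hwx]
        rw [hfun, ih _ (by rw [pvUpd_other _ _ _ _ (fun h => hxy h.symm)]; exact hy)]
      · rw [if_neg hx, if_neg hx, ih _ hy]

lemma pvLoopF_zero (base : List (List Int)) (c : List Int → Int)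
    (h : ∀ v, c v = 0) : pvLoopF c base = base := by
  induction base with
  | nil => rfl
  | cons x xs ih => simp [pvLoopF, h, ih]

lemma pvLoopF_count (r base : List (List Int)) :
    pvLoopF (fun v => (r.count v : Int)) base
      = r.foldl (fun out x => out.erase x) base := by
  induction r generalizing base with
  | nil => exact pvLoopF_zero base _ (by simp)
  | cons y r' ih =>
    have hfun : (fun v => (((y :: r').count v : Nat) : Int))
         = pvUpd (fun v => ((r'.count v : Nat) : Int)) y
             ((fun v => ((r'.count v : Nat) : Int)) y + 1) := by
      funext v
      by_cases hv : v = y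
      · subst hv; rw [pvUpd_self]; simp
      · rw [pvUpd_other _ _ _ _ hv]; simp [Ne.symm hv]
    rw [hfun,
      pvLoopF_bump base (fun v => ((r'.count v : Nat) : Int)) y (Int.natCast_nonneg _),
      ih, List.foldl_cons]

-- B's step is exactly List.erase.
lemma pvB_step (out : List (List Int)) (x : List Int) :
    (if x ∈ out then (PySem.List.remove? out x).getD out else out) = out.erase x := by
  by_cases h : x ∈ out
  · rw [if_pos h, PySem.List.remove?_eq_some_erase out x h]; rfl
  · rw [if_neg h, List.erase_of_not_mem h]

-- ===== VERDICT (by name: the statement is the Claim_ definition above) =====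
theorem remove_multiset_py_spec : Claim_equal_remove_multiset_py := by
  intro base_list to_remove _
  unfold Spec_remove_multiset_py remove_multiset_py remove_multiset_py_alt
  rw [pvA_loop]
  have hc : (fun v => (PySem.Dict.counter to_remove).getD v 0)
      = (fun v => (to_remove.count v : Int)) := by
    funext v; exact PySem.Dict.getD_counter to_remove v
  simp only [List.nil_append, hc, pvLoopF_count, pvB_step]
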